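-- pv_equiv track=rewrite | github.com/la08rehy/BA | PythonProject/Auswertung.py | countForEachTimeStep
-- ===== SOURCE A (Python) =====
-- def countForEachTimeStep(l, timeintervall):
--     res = []
--     for i in range(timeintervall):
--         curTimeStep = [x[1] for x in l if 3600 * i <= x[0] < 3600 * (i + 1)]
--         flattened = [x for y in curTimeStep for x in y]
--         counted = counts(flattened)
--         res.append(counted)
--     return res
--
-- def counts(a):
--     b = list(set(a))
--     b.sort()
--     res = []
--     for i in range(len(b)):
--         res.append((b[i], a.count(b[i])))
--     return res
-- ===== SOURCE B (Python) =====
-- def countForEachTimeStep(l, timeintervall):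
--     n = timeintervall if timeintervall > 0 else 0
--     buckets = [{} for _ in range(n)]
--     for t, ys in l:
--         i = t // 3600
--         if 0 <= i < n:
--             d = buckets[i]
--             for y in ys:
--                 d[y] = d.get(y, 0) + 1
--     return [[(k, d[k]) for k in sorted(d)] for d in buckets]
-- ===== Notes on version B (the rewrite author's own statement) =====
-- stated objective: faster
-- what changed: Instead of rescanning the whole list for every time step and counting each distinct value with a quadratic list.count pass, B makes one pass over the records, bucketing each by t // 3600 into a per-bucket dict counter, then emits sorted (key, count) pairs per bucket.
import Mathlib
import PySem

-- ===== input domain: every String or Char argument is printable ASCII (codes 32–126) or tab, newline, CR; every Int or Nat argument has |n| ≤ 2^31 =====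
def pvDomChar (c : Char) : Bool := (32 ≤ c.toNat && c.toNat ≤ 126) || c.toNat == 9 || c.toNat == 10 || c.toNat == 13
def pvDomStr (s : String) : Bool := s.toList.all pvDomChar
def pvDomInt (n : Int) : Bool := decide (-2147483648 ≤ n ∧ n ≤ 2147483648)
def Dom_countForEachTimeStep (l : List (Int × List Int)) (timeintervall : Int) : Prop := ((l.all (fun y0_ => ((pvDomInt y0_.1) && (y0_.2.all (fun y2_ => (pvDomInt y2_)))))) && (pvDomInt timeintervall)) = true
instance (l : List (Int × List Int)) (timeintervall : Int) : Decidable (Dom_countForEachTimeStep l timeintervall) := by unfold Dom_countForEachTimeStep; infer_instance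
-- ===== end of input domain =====

-- B replaces A's per-time-step rescans of the whole list (and quadratic counts) by a single
-- pass that buckets each record by t // 3600 into a per-bucket counter dict; objective: faster.

-- ===== PORT A =====
-- counts(a): distinct sorted values, each paired with a.count(x)
def pvCounts (a : List Int) : List (Int × Int) :=
  let b := PySem.List.sorted (PySem.Set.ofList a) (fun x => x) false
  (PySem.List.pyRange 0 (b.length : Int) 1).foldl
    (fun res i =>
      let x := PySem.List.pyGetD b i 0   -- b[i], index always in range
      res ++ [(x, (PySem.List.count a x : Int))]) []

def countForEachTimeStep (l : List (Int × List Int)) (timeintervall : Int) : List (List (Int × Int)) :=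
  (PySem.List.pyRange 0 timeintervall 1).foldl
    (fun res i =>
      let curTimeStep := (l.filter (fun x => decide (3600 * i ≤ x.1 ∧ x.1 < 3600 * (i + 1)))).map (fun x => x.2)
      let flattened := curTimeStep.flatMap (fun y => y)
      let counted := pvCounts flattened
      res ++ [counted]) []

-- ===== PORT B =====
-- the inner 'for y in ys: d[y] = d.get(y, 0) + 1' loop
def pvBump (d : PySem.Dict Int Int) (ys : List Int) : PySem.Dict Int Int :=
  ys.foldl (fun d y => d.insert y (d.getD y 0 + 1)) d

def countForEachTimeStep_alt (l : List (Int × List Int)) (timeintervall : Int) : List (List (Int × Int)) :=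
  let n : Nat := if 0 < timeintervall then timeintervall.toNat else 0
  let buckets : List (PySem.Dict Int Int) :=
    l.foldl (fun bs x =>
        let i := PySem.Int.floordiv x.1 3600
        if 0 ≤ i ∧ i < (n : Int) then bs.modify i.toNat (fun d => pvBump d x.2) else bs)
      (List.replicate n PySem.Dict.empty)
  buckets.map (fun d =>
    (PySem.List.sorted d.keys (fun k => k) false).map (fun k => (k, d.getD k 0)))  -- d[k]: k ∈ d, exact

-- ===== PRECONDITION & SPEC =====
def Spec_countForEachTimeStep (l : List (Int × List Int)) (timeintervall : Int) (out : List (List (Int × Int))) : Prop := out = countForEachTimeStep_alt l timeintervall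
instance (l : List (Int × List Int)) (timeintervall : Int) (out : List (List (Int × Int))) : Decidable (Spec_countForEachTimeStep l timeintervall out) := by unfold Spec_countForEachTimeStep; infer_instance

-- ===== CLAIM (what is proved, stated in full; the proofs are below) =====
def Claim_equal_countForEachTimeStep : Prop := ∀ (l : List (Int × List Int)) (timeintervall : Int), Dom_countForEachTimeStep l timeintervall → Spec_countForEachTimeStep l timeintervall (countForEachTimeStep l timeintervall)

-- ===== LEMMAS AND PROOFS =====

-- the values falling into hour bucket i, as A gathers them
def pvFlat (l : List (Int × List Int)) (i : Int) : List Int :=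
  ((l.filter (fun x => decide (3600 * i ≤ x.1 ∧ x.1 < 3600 * (i + 1)))).map (fun x => x.2)).flatMap (fun y => y)

theorem pv_foldl_append_map {α β : Type} (g : α → β) :
    ∀ (xs : List α) (init : List β),
      xs.foldl (fun res x => res ++ [g x]) init = init ++ xs.map g := by
  intro xs
  induction xs with
  | nil => simp
  | cons a t ih => intro init; simp [List.foldl, ih]

theorem pvCounts_eq (a : List Int) :
    pvCounts a = (PySem.List.sorted (PySem.Set.ofList a) (fun x => x) false).map
      (fun x => (x, (PySem.List.count a x : Int))) := by
  unfold pvCounts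
  rw [PySem.List.foldl_pyRange_zero_pyGetD'
      (PySem.List.sorted (PySem.Set.ofList a) (fun x => x) false) 0
      (fun res x => res ++ [(x, (PySem.List.count a x : Int))]) []]
  exact pv_foldl_append_map _ _ _

theorem pvA_eq (l : List (Int × List Int)) (t : Int) :
    countForEachTimeStep l t = (PySem.List.pyRange 0 t 1).map (fun i => pvCounts (pvFlat l i)) := by
  unfold countForEachTimeStep pvFlat
  exact pv_foldl_append_map _ _ _

theorem pvFlat_append (l : List (Int × List Int)) (x : Int × List Int) (i : Int) :
    pvFlat (l ++ [x]) i =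
      pvFlat l i ++ (if 3600 * i ≤ x.1 ∧ x.1 < 3600 * (i + 1) then x.2 else []) := by
  unfold pvFlat
  by_cases h : 3600 * i ≤ x.1 ∧ x.1 < 3600 * (i + 1) <;> simp [h]

theorem pvBump_counter (xs ys : List Int) :
    pvBump (PySem.Dict.counter xs) ys = PySem.Dict.counter (xs ++ ys) := by
  induction ys generalizing xs with
  | nil => simp [pvBump]
  | cons y t ih =>
    show pvBump ((PySem.Dict.counter xs).insert y ((PySem.Dict.counter xs).getD y 0 + 1)) t = _
    have h1 : (PySem.Dict.counter xs).insert y ((PySem.Dict.counter xs).getD y 0 + 1)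
        = PySem.Dict.counter (xs ++ [y]) := by
      have h2 := PySem.Dict.foldl_insert_getD_add_one_eq_counter (κ := Int) (xs ++ [y])
      rw [List.foldl_append] at h2
      rw [← h2, PySem.Dict.foldl_insert_getD_add_one_eq_counter xs]
      rfl
    rw [h1, ih, List.append_assoc]
    rfl

-- whether record x falls in bucket j is exactly 'x.1 // 3600 = j'
theorem pv_cond_iff (x : Int) (j : Nat) (hx : 0 ≤ PySem.Int.floordiv x 3600) :
    (PySem.Int.floordiv x 3600).toNat = j ↔ (3600 * (j : Int) ≤ x ∧ x < 3600 * ((j : Int) + 1)) := by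
  have hfd := PySem.Int.floordiv_eq_iff_of_pos (a := x) (b := 3600) (q := (j : Int)) (by norm_num)
  constructor
  · intro hh
    have he : PySem.Int.floordiv x 3600 = (j : Int) := by omega
    have := hfd.mp he
    omega
  · intro hh
    have he : PySem.Int.floordiv x 3600 = (j : Int) := hfd.mpr (by omega)
    omega

-- bucket j holds the counter of A's bucket-j values: the loop invariant of B's single pass
theorem pvBuckets_eq (n : Nat) (l : List (Int × List Int)) :
    l.foldl (fun bs x =>
        let i := PySem.Int.floordiv x.1 3600
        if 0 ≤ i ∧ i < (n : Int) then bs.modify i.toNat (fun d => pvBump d x.2) else bs)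
      (List.replicate n PySem.Dict.empty)
    = (List.range n).map (fun j : Nat => PySem.Dict.counter (pvFlat l (j : Int))) := by
  induction l using List.reverseRecOn with
  | nil =>
    simp only [List.foldl_nil]
    apply List.ext_getElem
    · simp
    intro j h1 h2
    simp only [List.getElem_replicate, List.getElem_map, List.getElem_range]
    show PySem.Dict.empty = PySem.Dict.counter (pvFlat [] _)
    rfl
  | append_singleton l x ih =>
    rw [List.foldl_append, ih, List.foldl_cons, List.foldl_nil]
    show (if 0 ≤ PySem.Int.floordiv x.1 3600 ∧ PySem.Int.floordiv x.1 3600 < (n : Int) then _ else _) = _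
    by_cases h : 0 ≤ PySem.Int.floordiv x.1 3600 ∧ PySem.Int.floordiv x.1 3600 < (n : Int)
    · rw [if_pos h]
      apply List.ext_getElem
      · simp
      intro j h1 h2
      rw [List.getElem_modify]
      simp only [List.getElem_map, List.getElem_range]
      have hcond := pv_cond_iff x.1 j h.1
      by_cases hj : (PySem.Int.floordiv x.1 3600).toNat = j
      · rw [if_pos hj, pvFlat_append, if_pos (hcond.mp hj), pvBump_counter]
      · rw [if_neg hj, pvFlat_append, if_neg (fun hc => hj (hcond.mpr hc)), List.append_nil]
    · rw [if_neg h]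
      apply List.map_congr_left
      intro j hj
      have hjn : j < n := List.mem_range.mp hj
      rw [pvFlat_append, if_neg, List.append_nil]
      intro hc
      have h0 : 0 ≤ PySem.Int.floordiv x.1 3600 := by
        have := (PySem.Int.floordiv_eq_iff_of_pos (a := x.1) (b := 3600) (q := (j : Int)) (by norm_num)).mpr (by omega)
        omega
      have := (pv_cond_iff x.1 j h0).mpr hc
      exact h ⟨h0, by omega⟩

-- ===== VERDICT (by name: the statement is the Claim_ definition above) =====
theorem countForEachTimeStep_spec : Claim_equal_countForEachTimeStep := by
  intro l t _
  unfold Spec_countForEachTimeStep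
  rw [pvA_eq]
  show _ = countForEachTimeStep_alt l t
  unfold countForEachTimeStep_alt
  simp only []
  rw [pvBuckets_eq, List.map_map, PySem.List.pyRange_one, List.map_map]
  have hn : (if 0 < t then t.toNat else 0) = (t - 0).toNat := by split <;> omega
  rw [hn]
  apply List.map_congr_left
  intro j hj
  simp only [Function.comp]
  rw [pvCounts_eq]
  have ha : (0 : Int) + (j : Int) = (j : Int) := by ring
  rw [ha, PySem.Dict.keys_counter]
  apply List.map_congr_left
  intro k hk
  rw [PySem.Dict.getD_counter]
  rfl
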